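-- pv_equiv track=rewrite | github.com/ravish0007/Hackerrank-Interview-prep-kit | Sorting/Fradulent_Activity_Notifications.py | activityNotifications
-- ===== SOURCE A (Python) =====
-- from bisect import insort, bisect_left
--
-- def activityNotifications(expenditure, d):
--     v = sorted(expenditure[: d])
--     count = 0
--     for i, current in enumerate(expenditure[d:]):
--         de = expenditure[i]
--         if d%2 == 0:
--             if current >= v[d//2] + v[d//2-1]:
--                 count += 1
--         elif current >= v[d//2]*2:
--                 count += 1
--         ix = bisect_left(v, de)
--         del v[ix]
--         insort(v, current)
--     return count
-- ===== SOURCE B (Python) =====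
-- def activityNotifications(expenditure, d):
--     # Stateless re-implementation: for each day, sort that day's trailing
--     # window afresh and read the median off the sorted slice.
--     n = len(expenditure)
--     count = 0
--     for i in range(d, n):
--         w = sorted(expenditure[i - d:i])
--         if d % 2 == 0:
--             t = w[d // 2] + w[d // 2 - 1]
--         else:
--             t = 2 * w[d // 2]
--         if expenditure[i] >= t:
--             count += 1
--     return count
-- ===== Notes on version B (the rewrite author's own statement) =====
-- stated objective: simpler
-- what changed: A incrementally maintains one sorted window with bisect_left deletion and insort insertion; B is stateless and simply re-sorts each day's d-element window and reads the median off the sorted slice.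
-- outside the precondition, e.g. on activityNotifications([], 0): A returns 0, B returns 0; on activityNotifications([1, 2, 3], -1): A returns 0, B raises IndexError
import Mathlib
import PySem

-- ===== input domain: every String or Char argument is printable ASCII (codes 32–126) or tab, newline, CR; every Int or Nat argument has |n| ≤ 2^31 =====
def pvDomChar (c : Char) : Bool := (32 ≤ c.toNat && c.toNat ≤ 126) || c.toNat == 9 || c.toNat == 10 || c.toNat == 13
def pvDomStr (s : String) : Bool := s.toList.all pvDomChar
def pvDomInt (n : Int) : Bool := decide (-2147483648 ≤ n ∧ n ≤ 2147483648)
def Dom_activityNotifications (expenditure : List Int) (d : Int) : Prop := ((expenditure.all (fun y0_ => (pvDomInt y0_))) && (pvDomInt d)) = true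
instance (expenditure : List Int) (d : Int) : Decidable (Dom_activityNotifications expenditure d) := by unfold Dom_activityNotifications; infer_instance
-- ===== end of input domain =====

-- B replaces A's incrementally-maintained sorted window (bisect delete + insort) by
-- re-sorting each day's window afresh — a simpler, stateless decomposition (not faster).

-- ===== PORT A =====
-- one loop step of A: state (v, count), element (i, current) from enumerate(expenditure[d:])
def pvStepA (expenditure : List Int) (d : Int) (s : List Int × Int) (p : Int × Int) : List Int × Int :=
  let v := s.1
  let current := p.2
  let de := PySem.List.pyGetD expenditure p.1 0     -- expenditure[i]; in range under Pre_
  let count :=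
    if PySem.Int.mod d 2 = 0 then
      (if current ≥ PySem.List.pyGetD v (PySem.Int.floordiv d 2) 0
                    + PySem.List.pyGetD v (PySem.Int.floordiv d 2 - 1) 0
       then s.2 + 1 else s.2)
    else
      (if current ≥ PySem.List.pyGetD v (PySem.Int.floordiv d 2) 0 * 2
       then s.2 + 1 else s.2)
  let ix := PySem.List.bisectLeft v de
  let v := v.eraseIdx ix                                 -- del v[ix]; in range under Pre_
  let v := PySem.List.insert v ((PySem.List.bisectRight v current : Nat) : Int) current  -- insort(v, current)
  (v, count)

def activityNotifications (expenditure : List Int) (d : Int) : Int :=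
  let v := PySem.List.sorted (PySem.List.slice expenditure none (some d)) (fun x => x) false
  ((PySem.List.enumerate (PySem.List.slice expenditure (some d) none) 0).foldl
    (pvStepA expenditure d) (v, 0)).2

-- ===== PORT B =====
-- one loop step of B: count, day index i
def pvStepB (expenditure : List Int) (d : Int) (count : Int) (i : Int) : Int :=
  let w := PySem.List.sorted (PySem.List.slice expenditure (some (i - d)) (some i)) (fun x => x) false
  let t :=
    if PySem.Int.mod d 2 = 0 then
      PySem.List.pyGetD w (PySem.Int.floordiv d 2) 0 + PySem.List.pyGetD w (PySem.Int.floordiv d 2 - 1) 0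
    else
      2 * PySem.List.pyGetD w (PySem.Int.floordiv d 2) 0
  if PySem.List.pyGetD expenditure i 0 ≥ t then count + 1 else count

def activityNotifications_alt (expenditure : List Int) (d : Int) : Int :=
  (PySem.List.pyRange d (PySem.List.len expenditure) 1).foldl (pvStepB expenditure d) 0

-- ===== PRECONDITION & SPEC =====
-- Pre_ excludes d ≤ 0: there A raises IndexError on most inputs and otherwise returns an
-- accidental value via negative-index wraparound into a too-short sorted window, and B's
-- own window indexing raises there.
def Pre_activityNotifications (expenditure : List Int) (d : Int) : Prop := 1 ≤ d
instance (expenditure : List Int) (d : Int) : Decidable (Pre_activityNotifications expenditure d) := by unfold Pre_activityNotifications; infer_instance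
def pvWitness_activityNotifications : List Int × Int := ([2, 3, 4, 2, 3, 6, 8, 4, 5], 5)

def Spec_activityNotifications (expenditure : List Int) (d : Int) (out : Int) : Prop := out = activityNotifications_alt expenditure d
instance (expenditure : List Int) (d : Int) (out : Int) : Decidable (Spec_activityNotifications expenditure d out) := by unfold Spec_activityNotifications; infer_instance

-- ===== CLAIM (what is proved, stated in full; the proofs are below) =====
def Claim_equal_activityNotifications : Prop := ∀ (expenditure : List Int) (d : Int), Dom_activityNotifications expenditure d → Pre_activityNotifications expenditure d → Spec_activityNotifications expenditure d (activityNotifications expenditure d)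

-- ===== LEMMAS AND PROOFS =====

-- the (unsorted) window of d values ending just before index k + d
def pvWindow (expenditure : List Int) (dn k : Nat) : List Int := (expenditure.drop k).take dn

lemma eraseIdx_firstOcc (a : Int) : ∀ (v : List Int) (ix : Nat) (hlt : ix < v.length),
    (∀ j (hj : j < v.length), j < ix → v[j] ≠ a) → v[ix] = a →
    v.eraseIdx ix = v.erase a := by
  intro v
  induction v with
  | nil => intro ix h; simp at h
  | cons b t ih =>
    intro ix hlt hne heq
    cases ix with
    | zero => simp at heq; simp [heq]
    | succ n =>
      have hb : b ≠ a := hne 0 (by simp) (by omega)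
      have : (b == a) = false := by simp [hb]
      simp only [List.eraseIdx_cons_succ, List.erase_cons, this, Bool.false_eq_true, if_false]
      rw [ih n (by simpa using hlt) (fun j hj hjn => hne (j+1) (by simpa using hj) (by omega))
          (by simpa using heq)]

lemma eraseIdx_bisectLeft (v : List Int) (a : Int)
    (hs : v.Pairwise (· ≤ ·)) (ha : a ∈ v) :
    v.eraseIdx (PySem.List.bisectLeft v a) = v.erase a := by
  obtain ⟨spec1, spec2, spec3⟩ := PySem.List.bisectLeft_spec v a hs
  obtain ⟨j, hj, hja⟩ := List.mem_iff_getElem.mp ha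
  set ix := PySem.List.bisectLeft v a with hix
  have hixj : ix ≤ j := by
    by_contra hc
    exact absurd hja (by have := spec2 j hj (by omega); omega)
  have hlt : ix < v.length := by omega
  have hva : v[ix] = a := by
    have h1 : a ≤ v[ix] := spec3 ix hlt le_rfl
    rcases eq_or_lt_of_le hixj with h | h
    · simp only [h]; exact hja
    · have h2 := List.pairwise_iff_getElem.mp hs ix j hlt hj h
      omega
  exact eraseIdx_firstOcc a v ix hlt (fun j' hj' hlt' => by have := spec2 j' hj' hlt'; omega) hva

lemma insort_eq (v : List Int) (x : Int) (hs : v.Pairwise (· ≤ ·)) :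
    PySem.List.insert v ((PySem.List.bisectRight v x : Nat) : Int) x
      = v.take (PySem.List.bisectRight v x) ++ x :: v.drop (PySem.List.bisectRight v x) := by
  exact PySem.List.insert_natCast v _ x (PySem.List.bisectRight_spec v x hs).1

lemma insort_perm (v : List Int) (x : Int) (hs : v.Pairwise (· ≤ ·)) :
    (PySem.List.insert v ((PySem.List.bisectRight v x : Nat) : Int) x).Perm (x :: v) := by
  rw [insort_eq v x hs]
  calc (v.take _ ++ x :: v.drop _).Perm (x :: (v.take _ ++ v.drop _)) := List.perm_middle
    _ = x :: v := by rw [List.take_append_drop]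

lemma insort_pairwise (v : List Int) (x : Int) (hs : v.Pairwise (· ≤ ·)) :
    (PySem.List.insert v ((PySem.List.bisectRight v x : Nat) : Int) x).Pairwise (· ≤ ·) := by
  obtain ⟨spec1, spec2, spec3⟩ := PySem.List.bisectRight_spec v x hs
  rw [insort_eq v x hs]
  set ix := PySem.List.bisectRight v x with hix
  rw [List.pairwise_append]
  refine ⟨hs.sublist (List.take_sublist _ _), ?_, ?_⟩
  · rw [List.pairwise_cons]
    refine ⟨?_, hs.sublist (List.drop_sublist _ _)⟩
    intro b hb
    obtain ⟨j, hj, hjb⟩ := List.mem_iff_getElem.mp hb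
    rw [List.getElem_drop] at hjb
    have := spec3 (ix + j) (by simp at hj; omega) (by omega)
    omega
  · intro b hb c hc
    obtain ⟨j, hm, hjb⟩ := List.mem_take_iff_getElem.mp hb
    have hbx : b ≤ x := by have := spec2 j (by omega) (by omega); omega
    rcases List.mem_cons.mp hc with rfl | hc
    · exact hbx
    · obtain ⟨j', hj', hjc⟩ := List.mem_iff_getElem.mp hc
      rw [List.getElem_drop] at hjc
      have := spec3 (ix + j') (by simp at hj'; omega) (by omega)
      omega

lemma window_step (expenditure : List Int) (dn k : Nat) (h1 : 1 ≤ dn)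
    (h : dn + k < expenditure.length) :
    (expenditure[dn + k] :: (pvWindow expenditure dn k).erase expenditure[k]).Perm
      (pvWindow expenditure dn (k + 1)) := by
  obtain ⟨m, rfl⟩ : ∃ m, dn = m + 1 := ⟨dn - 1, by omega⟩
  have hk : k < expenditure.length := by omega
  have hd : expenditure.drop k = expenditure[k] :: expenditure.drop (k + 1) :=
    List.drop_eq_getElem_cons hk
  have h2 : pvWindow expenditure (m+1) (k+1) = (expenditure.drop (k+1)).take m ++ [expenditure[m+1+k]] := by
    unfold pvWindow
    rw [List.take_add_one]
    congr 1
    rw [List.getElem?_drop]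
    simp only [List.getElem?_eq_getElem (by omega : k + 1 + m < expenditure.length)]
    simp [Option.toList]
    congr 1
    omega
  rw [h2]
  unfold pvWindow
  rw [hd, List.take_succ_cons, List.erase_cons_head]
  exact (List.perm_append_singleton _ _).symm

lemma loop_eq (expenditure : List Int) (dn : Nat) (h1 : 1 ≤ dn) :
    ∀ (ys : List Int) (k : Nat) (c : Int),
      expenditure.drop (dn + k) = ys →
      ((PySem.List.enumerate ys (k : Int)).foldl (pvStepA expenditure (dn : Int))
          (PySem.List.sorted (pvWindow expenditure dn k) (fun x => x) false, c)).2
        = (PySem.List.pyRange ((dn + k : Nat) : Int) ((expenditure.length : Nat) : Int) 1).foldl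
            (pvStepB expenditure (dn : Int)) c := by
  intro ys
  induction ys with
  | nil =>
    intro k c hdrop
    have hlen : expenditure.length ≤ dn + k := by
      have := List.drop_eq_nil_iff.mp hdrop; omega
    rw [PySem.List.pyRange_one_eq_nil (by exact_mod_cast hlen)]
    simp [PySem.List.enumerate]
  | cons x ys' ih =>
    intro k c hdrop
    have hlt : dn + k < expenditure.length := by
      by_contra hc
      rw [List.drop_eq_nil_iff.mpr (by omega)] at hdrop
      simp at hdrop
    have hcons : expenditure.drop (dn + k) = expenditure[dn + k] :: expenditure.drop (dn + k + 1) :=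
      List.drop_eq_getElem_cons hlt
    rw [hdrop] at hcons
    obtain ⟨hx, hys'⟩ : x = expenditure[dn + k] ∧ ys' = expenditure.drop (dn + k + 1) := by
      injection hcons with h1 h2; exact ⟨h1, h2⟩
    subst hx
    have hk : k < expenditure.length := by omega
    set v := PySem.List.sorted (pvWindow expenditure dn k) (fun x => x) false with hv
    have hvp : v.Perm (pvWindow expenditure dn k) := PySem.List.sorted_perm _ _ _
    have hvs : v.Pairwise (· ≤ ·) := PySem.List.sorted_pairwise _ _
    -- expenditure[k] is in the window (it is its head), hence in v
    have hmemw : expenditure[k] ∈ pvWindow expenditure dn k := by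
      unfold pvWindow
      rw [List.mem_take_iff_getElem]
      exact ⟨0, by simp [List.length_drop]; omega, by simp [List.getElem_drop]⟩
    have hmem : expenditure[k] ∈ v := hvp.mem_iff.mpr hmemw
    -- de = expenditure[k]
    have hde : PySem.List.pyGetD expenditure ((k : Nat) : Int) 0 = expenditure[k] := by
      rw [PySem.List.pyGetD_natCast]; exact List.getD_eq_getElem _ _ hk
    -- the new window state
    have herase : v.eraseIdx (PySem.List.bisectLeft v expenditure[k]) = v.erase expenditure[k] :=
      eraseIdx_bisectLeft v _ hvs hmem
    have hvs' : (v.erase expenditure[k]).Pairwise (· ≤ ·) := hvs.sublist (List.erase_sublist)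
    set v' := PySem.List.insert (v.erase expenditure[k])
        ((PySem.List.bisectRight (v.erase expenditure[k]) expenditure[dn + k] : Nat) : Int)
        expenditure[dn + k] with hv'
    have hp1 : v'.Perm (expenditure[dn + k] :: v.erase expenditure[k]) := insort_perm _ _ hvs'
    have hp2 : (v.erase expenditure[k]).Perm ((pvWindow expenditure dn k).erase expenditure[k]) :=
      hvp.erase _
    have hv'p : v'.Perm (pvWindow expenditure dn (k + 1)) :=
      (hp1.trans (hp2.cons _)).trans (window_step expenditure dn k h1 hlt)
    have hv's : v'.Pairwise (· ≤ ·) := insort_pairwise _ _ hvs'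
    have hvnew : PySem.List.sorted (pvWindow expenditure dn (k + 1)) (fun x => x) false = v' :=
      PySem.List.sorted_id_eq_of_perm_of_pairwise _ _ hv'p hv's
    -- B's sorted slice equals v
    have hslice : PySem.List.slice expenditure (some (((dn + k : Nat) : Int) - (dn : Int)))
        (some ((dn + k : Nat) : Int)) = pvWindow expenditure dn k := by
      have hc1 : ((dn + k : Nat) : Int) - (dn : Int) = ((k : Nat) : Int) := by push_cast; ring
      rw [hc1, PySem.List.slice_natCast]
      unfold pvWindow
      congr 1
      omega
    -- expenditure[i] on B's side
    have hgetB : PySem.List.pyGetD expenditure ((dn + k : Nat) : Int) 0 = expenditure[dn + k] := by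
      rw [PySem.List.pyGetD_natCast]; exact List.getD_eq_getElem _ _ hlt
    -- one A-step
    have hstepA : pvStepA expenditure (dn : Int) (v, c) (((k : Nat) : Int), expenditure[dn + k])
        = (v', pvStepB expenditure (dn : Int) c ((dn + k : Nat) : Int)) := by
      unfold pvStepA pvStepB
      simp only [hde, herase, hslice, ← hv, hgetB, ← hv']
      congr 1
      split_ifs with h h2 h3 h4 h5 <;>
        first
        | rfl
        | omega
    -- unfold one step on both sides
    rw [PySem.List.enumerate_cons, List.foldl_cons, hstepA,
        PySem.List.pyRange_one_cons (by exact_mod_cast hlt), List.foldl_cons]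
    have hcast1 : ((k : Int) + 1) = ((k + 1 : Nat) : Int) := by push_cast; ring
    have hcast2 : (((dn + k : Nat) : Int) + 1) = ((dn + (k + 1) : Nat) : Int) := by push_cast; ring
    rw [hcast1, hcast2, ← hvnew]
    exact ih (k + 1) _ (by rw [hys']; congr 1)

-- ===== VERDICT (by name: the statement is the Claim_ definition above) =====
theorem activityNotifications_spec : Claim_equal_activityNotifications := by
  intro expenditure d _ hpre
  have hd : 1 ≤ d := hpre
  unfold Spec_activityNotifications activityNotifications activityNotifications_alt
  obtain ⟨dn, rfl⟩ : ∃ n : Nat, d = (n : Int) := ⟨d.toNat, by omega⟩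
  have h1 : 1 ≤ dn := by exact_mod_cast hd
  have hslice0 : PySem.List.slice expenditure none (some (dn : Int)) = pvWindow expenditure dn 0 := by
    simp [PySem.List.slice_to_natCast, pvWindow]
  have hslice1 : PySem.List.slice expenditure (some (dn : Int)) none = expenditure.drop dn := by
    simp [PySem.List.slice_from_natCast]
  rw [hslice0, hslice1]
  have := loop_eq expenditure dn h1 (expenditure.drop dn) 0 0 (by simp)
  simpa [PySem.List.len_eq] using this
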